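-- pv_equiv track=rewrite | github.com/ramsaidevisetti/youTubeSummarizationV2 | ai_services/vectorestore/retriever.py | retrieve_top_k
-- ===== SOURCE A (Python) =====
-- def retrieve_top_k(chunks: list, query: str, k: int = 5):
--     query_words = set(query.lower().split())
--     scored = []
--
--     for chunk in chunks:
--         chunk_words = set(chunk["text"].lower().split())
--         score = len(query_words & chunk_words)
--         scored.append((score, chunk))
--
--     scored.sort(reverse=True, key=lambda x: x[0])
--     return [chunk for _, chunk in scored[:k]]
-- ===== SOURCE B (Python) =====
-- def retrieve_top_k(chunks: list, query: str, k: int = 5):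
--     # Counting/bucket strategy: score every chunk once, then emit chunks by
--     # descending score (scores lie in 0..len(query_words)); original order is
--     # preserved inside each score class, so ties break exactly like the stable sort.
--     query_words = set(query.lower().split())
--     scored = [(len(query_words & set(c["text"].lower().split())), c) for c in chunks]
--     ordered = []
--     for s in range(len(query_words), -1, -1):
--         ordered.extend(c for sc, c in scored if sc == s)
--     return ordered[:k]
-- ===== Notes on version B (the rewrite author's own statement) =====
-- stated objective: alternative
-- what changed: Replaces the comparison sort of (score, chunk) pairs by a counting/distribution pass: chunks are scored once and then emitted score class by score class, scanning the possible scores len(query_words)..0 in descending order, which reproduces the stable tie order without sorting.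
import Mathlib
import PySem

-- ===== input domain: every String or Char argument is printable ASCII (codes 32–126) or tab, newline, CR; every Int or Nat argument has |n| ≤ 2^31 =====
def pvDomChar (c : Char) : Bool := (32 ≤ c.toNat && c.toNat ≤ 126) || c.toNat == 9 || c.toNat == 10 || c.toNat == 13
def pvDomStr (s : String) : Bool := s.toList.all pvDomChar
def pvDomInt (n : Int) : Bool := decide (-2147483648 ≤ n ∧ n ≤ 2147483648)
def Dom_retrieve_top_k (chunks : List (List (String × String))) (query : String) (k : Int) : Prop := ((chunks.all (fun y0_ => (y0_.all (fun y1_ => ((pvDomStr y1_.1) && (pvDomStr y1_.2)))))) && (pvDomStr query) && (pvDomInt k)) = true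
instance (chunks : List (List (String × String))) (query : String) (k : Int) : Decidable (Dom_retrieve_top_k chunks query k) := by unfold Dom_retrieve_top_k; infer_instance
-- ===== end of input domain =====

-- B replaces A's comparison sort of (score, chunk) pairs by a descending counting/distribution
-- pass over the possible scores (alternative algorithm, same return value; no speed claim).


-- ===== PORT A =====
-- chunk["text"] raises KeyError when the key is missing; under Pre_ the key is present and
-- Dict.getD with a dummy default is exact.
def retrieve_top_k (chunks : List (List (String × String))) (query : String) (k : Int) : List (List (String × String)) :=
  let query_words := PySem.Set.ofList (PySem.Str.split₀ (PySem.Str.lower query))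
  let scored := chunks.foldl (fun acc chunk =>
    let chunk_words := PySem.Set.ofList (PySem.Str.split₀ (PySem.Str.lower (PySem.Dict.getD (PySem.Dict.mk chunk) "text" "")))
    acc ++ [(PySem.Set.len (PySem.Set.inter query_words chunk_words), chunk)]) []
  let sortedScored := PySem.List.sorted scored (fun x => x.1) true
  (PySem.List.slice sortedScored none (some k)).map (fun p => p.2)

-- ===== PORT B =====
def retrieve_top_k_alt (chunks : List (List (String × String))) (query : String) (k : Int) : List (List (String × String)) :=
  let query_words := PySem.Set.ofList (PySem.Str.split₀ (PySem.Str.lower query))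
  let scored := chunks.map (fun c =>
    (PySem.Set.len (PySem.Set.inter query_words (PySem.Set.ofList (PySem.Str.split₀ (PySem.Str.lower (PySem.Dict.getD (PySem.Dict.mk c) "text" ""))))), c))
  let ordered := (PySem.List.pyRange (PySem.Set.len query_words) (-1) (-1)).foldl
    (fun acc s => acc ++ (scored.filter (fun p => p.1 == s)).map (fun p => p.2)) []
  PySem.List.slice ordered none (some k)

-- ===== PRECONDITION & SPEC =====
-- Pre_ excludes exactly the chunks without a "text" key, on which Python's A raises KeyError.
def Pre_retrieve_top_k (chunks : List (List (String × String))) (query : String) (k : Int) : Prop :=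
  ∀ c ∈ chunks, (PySem.Dict.get? (PySem.Dict.mk c) "text").isSome = true
instance (chunks : List (List (String × String))) (query : String) (k : Int) : Decidable (Pre_retrieve_top_k chunks query k) := by unfold Pre_retrieve_top_k; infer_instance

def pvWitness_retrieve_top_k : (List (List (String × String))) × String × Int :=
  ([[("text", "hello world")], [("text", "hi there")]], "hello there", 1)

def Spec_retrieve_top_k (chunks : List (List (String × String))) (query : String) (k : Int) (out : List (List (String × String))) : Prop := out = retrieve_top_k_alt chunks query k
instance (chunks : List (List (String × String))) (query : String) (k : Int) (out : List (List (String × String))) : Decidable (Spec_retrieve_top_k chunks query k out) := by unfold Spec_retrieve_top_k; infer_instance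

-- ===== CLAIM (what is proved, stated in full; the proofs are below) =====
def Claim_equal_retrieve_top_k : Prop := ∀ (chunks : List (List (String × String))) (query : String) (k : Int), Dom_retrieve_top_k chunks query k → Pre_retrieve_top_k chunks query k → Spec_retrieve_top_k chunks query k (retrieve_top_k chunks query k)

-- ===== LEMMAS AND PROOFS =====

-- descending-score bucket concatenation: buckets M, M-1, ..., 0 of xs, in order
def pvDB {α : Type} : Nat → List (Int × α) → List (Int × α)
  | 0, xs => xs.filter (fun p => p.1 == (0 : Int))
  | M + 1, xs => xs.filter (fun p => p.1 == ((M : Int) + 1)) ++ pvDB M xs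

lemma pvDB_nil {α : Type} (M : Nat) : pvDB (α := α) M [] = [] := by
  induction M with
  | zero => simp [pvDB]
  | succ M ih => simp [pvDB, ih]

lemma pvDB_key_le {α : Type} (M : Nat) (xs : List (Int × α)) (p : Int × α)
    (hp : p ∈ pvDB M xs) : 0 ≤ p.1 ∧ p.1 ≤ (M : Int) := by
  induction M with
  | zero =>
      have := (List.mem_filter.mp hp).2
      have h0 : p.1 = 0 := by simpa using this
      omega
  | succ M ih =>
      rcases List.mem_append.mp hp with h | h
      · have := (List.mem_filter.mp h).2
        have h1 : p.1 = (M : Int) + 1 := by simpa using this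
        omega
      · have := ih h
        omega

lemma pvDB_append_gt {α : Type} (M : Nat) (xs : List (Int × α)) (x : Int × α)
    (hx : (M : Int) < x.1) : pvDB M (xs ++ [x]) = pvDB M xs := by
  induction M with
  | zero =>
      have : x.1 ≠ (0 : Int) := by omega
      simp [pvDB, List.filter_append, this]
  | succ M ih =>
      have h1 : x.1 ≠ (M : Int) + 1 := by omega
      have h2 : (M : Int) < x.1 := by omega
      simp only [pvDB, List.filter_append, ih h2]
      simp [h1]

lemma pvInsertBy_append_left {α : Type} (before : α → α → Bool) (x : α) (l ys : List α)
    (h : ∀ y ∈ l, before x y = false) :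
    PySem.List.insertBy before x (l ++ ys) = l ++ PySem.List.insertBy before x ys := by
  induction l with
  | nil => simp
  | cons a l ih =>
      have ha : before x a = false := h a (by simp)
      simp only [List.cons_append, PySem.List.insertBy, ha]
      simp [ih (fun y hy => h y (by simp [hy]))]

lemma pvInsertBy_all_before {α : Type} (before : α → α → Bool) (x : α) (ys : List α)
    (h : ∀ y ∈ ys, before x y = true) :
    PySem.List.insertBy before x ys = x :: ys := by
  cases ys with
  | nil => rfl
  | cons a l => simp [PySem.List.insertBy, h a (by simp)]

-- inserting x (stable, descending by key) into the bucket form appends x to its bucket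
lemma pvInsert_pvDB {α : Type} (M : Nat) (x : Int × α) (xs : List (Int × α))
    (hx0 : 0 ≤ x.1) (hxM : x.1 ≤ (M : Int)) :
    PySem.List.insertBy (fun a b => decide (b.1 < a.1)) x (pvDB M xs) = pvDB M (xs ++ [x]) := by
  induction M with
  | zero =>
      have hx : x.1 = 0 := by omega
      show PySem.List.insertBy _ x (xs.filter (fun p => p.1 == (0 : Int))) = _
      rw [PySem.List.insertBy_of_forall_not_before _ _ _ (by
        intro y hy
        have : y.1 = 0 := by simpa using (List.mem_filter.mp hy).2
        simp [this, hx])]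
      show _ = List.filter (fun p => p.1 == (0 : Int)) (xs ++ [x])
      simp [List.filter_append, hx]
  | succ M ih =>
      show PySem.List.insertBy _ x (xs.filter (fun p => p.1 == ((M : Int) + 1)) ++ pvDB M xs) = _
      rw [pvInsertBy_append_left _ _ _ _ (by
        intro y hy
        have hy1 : y.1 = (M : Int) + 1 := by simpa using (List.mem_filter.mp hy).2
        simp only [decide_eq_false_iff_not, not_lt, hy1]
        omega)]
      by_cases hx : x.1 = (M : Int) + 1
      · rw [pvInsertBy_all_before _ _ _ (by
          intro y hy
          have hb := pvDB_key_le M xs y hy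
          simp only [decide_eq_true_eq]
          omega)]
        show _ = List.filter (fun p => p.1 == ((M : Int) + 1)) (xs ++ [x]) ++ pvDB M (xs ++ [x])
        rw [pvDB_append_gt M xs x (by omega), List.filter_append]
        simp [hx]
      · rw [ih (by omega)]
        show _ = List.filter (fun p => p.1 == ((M : Int) + 1)) (xs ++ [x]) ++ pvDB M (xs ++ [x])
        rw [List.filter_append]
        simp [hx]

-- A's stable reverse sort on keys bounded by M IS the bucket concatenation
lemma pvSorted_eq_pvDB {α : Type} (M : Nat) (xs : List (Int × α))
    (h : ∀ p ∈ xs, 0 ≤ p.1 ∧ p.1 ≤ (M : Int)) :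
    PySem.List.sorted xs (fun p => p.1) true = pvDB M xs := by
  induction xs using List.reverseRecOn with
  | nil => simp [PySem.List.sorted_rev_eq_foldl_insertBy, pvDB_nil]
  | append_singleton xs x ih =>
      have hx := h x (by simp)
      rw [PySem.List.sorted_rev_eq_foldl_insertBy, List.foldl_append,
        ← PySem.List.sorted_rev_eq_foldl_insertBy]
      simp only [List.foldl_cons, List.foldl_nil]
      rw [ih (fun p hp => h p (by simp [hp])), pvInsert_pvDB M x xs hx.1 hx.2]

-- B's descending range of filters is the bucket concatenation
lemma pvDB_eq_flatMap {α : Type} (M : Nat) (xs : List (Int × α)) :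
    pvDB M xs = (PySem.List.pyRange (M : Int) (-1) (-1)).flatMap
      (fun s => xs.filter (fun p => p.1 == s)) := by
  induction M with
  | zero =>
      rw [PySem.List.pyRange_neg_one_cons (by norm_num),
        PySem.List.pyRange_neg_one_eq_nil (by norm_num)]
      simp [pvDB]
  | succ M ih =>
      rw [PySem.List.pyRange_neg_one_cons (by push_cast; omega)]
      have hc : ((M + 1 : Nat) : Int) - 1 = (M : Int) := by push_cast; ring
      rw [hc, List.flatMap_cons, ← ih]
      have hc2 : ((M + 1 : Nat) : Int) = (M : Int) + 1 := by push_cast; ring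
      rw [hc2]
      rfl

lemma pvSlice_map {α β : Type} (f : α → β) (xs : List α) (k : Int) :
    (PySem.List.slice xs none (some k)).map f = PySem.List.slice (xs.map f) none (some k) := by
  simp [PySem.List.slice, List.map_take]

-- ===== VERDICT (by name: the statement is the Claim_ definition above) =====
theorem retrieve_top_k_spec : Claim_equal_retrieve_top_k := by
  intro chunks query k _ _
  unfold Spec_retrieve_top_k retrieve_top_k retrieve_top_k_alt
  simp only []
  set qw := PySem.Set.ofList (PySem.Str.split₀ (PySem.Str.lower query)) with hqw
  set f : List (String × String) → Int × List (String × String) := fun c =>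
    (PySem.Set.len (PySem.Set.inter qw (PySem.Set.ofList (PySem.Str.split₀ (PySem.Str.lower
      (PySem.Dict.getD (PySem.Dict.mk c) "text" ""))))), c) with hf
  have hbound : ∀ p ∈ chunks.map f, 0 ≤ p.1 ∧ p.1 ≤ (qw.length : Int) := by
    intro p hp
    rcases List.mem_map.mp hp with ⟨c, _, rfl⟩
    simp only [hf, PySem.Set.len, PySem.Set.inter]
    have := List.length_filter_le (fun x => PySem.Set.contains
      (PySem.Set.ofList (PySem.Str.split₀ (PySem.Str.lower
        (PySem.Dict.getD (PySem.Dict.mk c) "text" "")))) x) qw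
    constructor
    · positivity
    · exact_mod_cast this
  have hA : chunks.foldl (fun acc chunk =>
      acc ++ [f chunk]) [] = chunks.map f :=
    PySem.List.foldl_append_singleton_eq_map f chunks []
  rw [hA]
  rw [pvSorted_eq_pvDB qw.length (chunks.map f) hbound]
  rw [PySem.List.foldl_append_eq_flatMap
    (fun s => ((chunks.map f).filter (fun p => p.1 == s)).map (fun p => p.2)) _ []]
  have hlen : PySem.Set.len qw = (qw.length : Int) := rfl
  rw [hlen]
  rw [← List.map_flatMap, ← pvDB_eq_flatMap qw.length (chunks.map f), pvSlice_map]
  simp
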